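-- pv_equiv track=rewrite | github.com/ChrisResl/vcHMM | get_sam_reads.py | update_insertions
-- ===== SOURCE A (Python) =====
-- def update_insertions(insertions):
--     """
--     updates startposition of insertions and returns new insertions
--     """
--     temp = 0
--     upd_inserts = []
--     for insert in insertions:
--         insert = [insert[0] + temp, insert[1], insert[2]]
--         temp += insert[1]
--         upd_inserts.append(insert)
--     return sorted(upd_inserts)
-- ===== SOURCE B (Python) =====
-- def update_insertions(insertions):
--     """
--     updates startposition of insertions and returns new insertions
--     """
--     # each record is computed independently: its offset is the sum of the
--     # second fields of all earlier records (a prefix slice), no running state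
--     return sorted(
--         [row[0] + sum(r[1] for r in insertions[:i]), row[1], row[2]]
--         for i, row in enumerate(insertions)
--     )
-- ===== Notes on version B (the rewrite author's own statement) =====
-- stated objective: alternative
-- what changed: Replaces A's single accumulator-threaded loop by an index-wise computation: each record's offset is recomputed from scratch as the sum of the second fields of its prefix slice (enumerate + slice + sum), trading A's O(n) pass for a stateless O(n^2) per-index formulation.
import Mathlib
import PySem

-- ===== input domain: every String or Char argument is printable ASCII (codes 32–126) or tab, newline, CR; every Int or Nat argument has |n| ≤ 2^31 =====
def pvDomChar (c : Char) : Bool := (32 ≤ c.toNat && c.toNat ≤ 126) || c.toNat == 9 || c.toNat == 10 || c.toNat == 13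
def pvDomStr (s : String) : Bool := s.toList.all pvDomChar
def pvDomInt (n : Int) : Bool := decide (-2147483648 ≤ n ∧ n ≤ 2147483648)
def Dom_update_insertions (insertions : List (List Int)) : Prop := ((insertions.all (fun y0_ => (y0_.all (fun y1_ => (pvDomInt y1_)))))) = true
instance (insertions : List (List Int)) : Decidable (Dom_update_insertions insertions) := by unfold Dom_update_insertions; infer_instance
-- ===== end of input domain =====

-- B replaces A's accumulator-threaded loop by a stateless index-wise pass:
-- each record's offset is the sum of the second fields of its prefix slice.

-- ===== PORT A =====
-- literal port of A: one loop threading (temp, upd_inserts); insert[i] = pyGet?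
-- (none = IndexError, excluded by Pre_; .getD 0 is never used inside Pre_)
def update_insertions (insertions : List (List Int)) : List (List Int) :=
  PySem.List.sorted
    (insertions.foldl
      (fun (s : Int × List (List Int)) insert =>
        (s.1 + (PySem.List.pyGet? insert 1).getD 0,
         s.2 ++ [[((PySem.List.pyGet? insert 0).getD 0) + s.1,
                  (PySem.List.pyGet? insert 1).getD 0,
                  (PySem.List.pyGet? insert 2).getD 0]]))
      (0, ([] : List (List Int)))).2
    (fun x => x) false

-- ===== PORT B =====
-- literal port of Source B: enumerate, each record built from its prefix slice's
-- sum of second fields (sum(gen) = .map …|>.sum), then sorted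
def update_insertions_alt (insertions : List (List Int)) : List (List Int) :=
  PySem.List.sorted
    ((PySem.List.enumerate insertions 0).map (fun p =>
      [((PySem.List.pyGet? p.2 0).getD 0) +
         ((PySem.List.slice insertions none (some p.1)).map
           (fun r => (PySem.List.pyGet? r 1).getD 0)).sum,
       (PySem.List.pyGet? p.2 1).getD 0,
       (PySem.List.pyGet? p.2 2).getD 0]))
    (fun x => x) false

-- ===== PRECONDITION & SPEC =====
-- Pre_ excludes inner lists shorter than 3, on which Python A raises IndexError.
def Pre_update_insertions (insertions : List (List Int)) : Prop :=
  ∀ l ∈ insertions, 3 ≤ l.length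
instance (insertions : List (List Int)) : Decidable (Pre_update_insertions insertions) := by
  unfold Pre_update_insertions; infer_instance
def pvWitness_update_insertions : List (List Int) := [[5, 2, 1], [3, 4, 0]]

def Spec_update_insertions (insertions : List (List Int)) (out : List (List Int)) : Prop := out = update_insertions_alt insertions
instance (insertions : List (List Int)) (out : List (List Int)) : Decidable (Spec_update_insertions insertions out) := by unfold Spec_update_insertions; infer_instance

-- ===== CLAIM (what is proved, stated in full; the proofs are below) =====
def Claim_equal_update_insertions : Prop := ∀ (insertions : List (List Int)), Dom_update_insertions insertions → Pre_update_insertions insertions → Spec_update_insertions insertions (update_insertions insertions)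

-- ===== LEMMAS AND PROOFS =====

-- the common record builder and second-field reader
def pvRec (ins : List Int) (t : Int) : List Int :=
  [((PySem.List.pyGet? ins 0).getD 0) + t,
   (PySem.List.pyGet? ins 1).getD 0,
   (PySem.List.pyGet? ins 2).getD 0]

def pvSnd (ins : List Int) : Int := (PySem.List.pyGet? ins 1).getD 0

-- the common specification of the unsorted result
def pvGo (t : Int) : List (List Int) → List (List Int)
  | [] => []
  | ins :: rest => pvRec ins t :: pvGo (t + pvSnd ins) rest

lemma foldA_eq (l : List (List Int)) : ∀ (t : Int) (acc : List (List Int)),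
    (l.foldl
      (fun (s : Int × List (List Int)) insert =>
        (s.1 + (PySem.List.pyGet? insert 1).getD 0,
         s.2 ++ [[((PySem.List.pyGet? insert 0).getD 0) + s.1,
                  (PySem.List.pyGet? insert 1).getD 0,
                  (PySem.List.pyGet? insert 2).getD 0]])) (t, acc)).2
    = acc ++ pvGo t l := by
  induction l with
  | nil => intro t acc; simp [pvGo]
  | cons x r ih =>
    intro t acc
    simp only [List.foldl_cons, pvGo]
    rw [ih]
    simp [pvRec, pvSnd]

-- B's per-index prefix-sum formulation equals pvGo, generalizing over the
-- consumed prefix (k elements already dropped from the full list)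
lemma mapB_eq (full : List (List Int)) (l : List (List Int)) : ∀ (k : Nat),
    full.drop k = l →
    (PySem.List.enumerate l (k : Int)).map (fun p =>
      [((PySem.List.pyGet? p.2 0).getD 0) +
         ((PySem.List.slice full none (some p.1)).map
           (fun r => (PySem.List.pyGet? r 1).getD 0)).sum,
       (PySem.List.pyGet? p.2 1).getD 0,
       (PySem.List.pyGet? p.2 2).getD 0])
    = pvGo (((full.take k).map pvSnd).sum) l := by
  induction l generalizing full with
  | nil => intro k _; simp [PySem.List.enumerate_nil, pvGo]
  | cons x r ih =>
    intro k hdrop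
    rw [PySem.List.enumerate_cons, List.map_cons, pvGo]
    congr 1
    · rw [PySem.List.slice_to_natCast]
      simp only [List.map_take]
      rfl
    · have hd1 : full.drop (k + 1) = r := by
        have := congrArg (List.drop 1) hdrop
        simpa [List.drop_drop, Nat.add_comm] using this
      have hk1 : ((k : Int) + 1) = ((k + 1 : Nat) : Int) := by push_cast; ring
      rw [hk1, ih full (k + 1) hd1]
      have htake : full.take (k + 1) = full.take k ++ [x] := by
        have : full.take (k + 1) = full.take k ++ (full.drop k).take 1 := by
          rw [← List.take_add]
        rw [this, hdrop]; rfl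
      rw [htake]
      simp [pvSnd]

-- ===== VERDICT (by name: the statement is the Claim_ definition above) =====
theorem update_insertions_spec : Claim_equal_update_insertions := by
  intro insertions _ _
  unfold Spec_update_insertions update_insertions update_insertions_alt
  rw [foldA_eq insertions 0 []]
  have h := mapB_eq insertions insertions 0 rfl
  simp only [Nat.cast_zero] at h
  rw [h]
  simp
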